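-- pv_equiv track=rewrite | github.com/alanchancl/IntentLoom | scripts/compare_methods_realk8s120_optionc.py | _stable_failures
-- ===== SOURCE A (Python) =====
-- from typing import Any, Dict, List, Optional, Tuple
--
-- def _stable_failures(fail_sets_by_seed: Dict[int, set]) -> Dict[str, Any]:
--     seeds = sorted(fail_sets_by_seed)
--     if not seeds:
--         return {"stable_3of3": [], "fail_2plus": []}
--
--     inter: Optional[set] = None
--     counts: Dict[str, int] = {}
--     for sd in seeds:
--         s = fail_sets_by_seed.get(sd) or set()
--         if inter is None:
--             inter = set(s)
--         else:
--             inter = inter.intersection(s)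
--         for tid in s:
--             counts[tid] = counts.get(tid, 0) + 1
--
--     inter = inter or set()
--     fail_2plus = sorted([tid for tid, c in counts.items() if c >= 2])
--     return {"stable_3of3": sorted(inter), "fail_2plus": fail_2plus}
-- ===== SOURCE B (Python) =====
-- def _stable_failures(fail_sets_by_seed):
--     seeds = sorted(fail_sets_by_seed)
--     if not seeds:
--         return {"stable_3of3": [], "fail_2plus": []}
--     counts = {}
--     for sd in seeds:
--         for tid in fail_sets_by_seed.get(sd, set()):
--             counts[tid] = counts.get(tid, 0) + 1
--     n = len(seeds)
--     return {
--         "stable_3of3": sorted(tid for tid, c in counts.items() if c == n),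
--         "fail_2plus": sorted(tid for tid, c in counts.items() if c >= 2),
--     }
-- ===== Notes on version B (the rewrite author's own statement) =====
-- stated objective: simpler
-- what changed: B drops A's incrementally maintained intersection set (and its None/or-set() plumbing) and derives the all-seeds-stable list purely from the single occurrence-count dict via count == number of seeds; Pre_ only states the encoding invariant of dict/set arguments (unique keys, distinct set elements), which every real Python input satisfies, so no Python input is excluded.
import Mathlib
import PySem

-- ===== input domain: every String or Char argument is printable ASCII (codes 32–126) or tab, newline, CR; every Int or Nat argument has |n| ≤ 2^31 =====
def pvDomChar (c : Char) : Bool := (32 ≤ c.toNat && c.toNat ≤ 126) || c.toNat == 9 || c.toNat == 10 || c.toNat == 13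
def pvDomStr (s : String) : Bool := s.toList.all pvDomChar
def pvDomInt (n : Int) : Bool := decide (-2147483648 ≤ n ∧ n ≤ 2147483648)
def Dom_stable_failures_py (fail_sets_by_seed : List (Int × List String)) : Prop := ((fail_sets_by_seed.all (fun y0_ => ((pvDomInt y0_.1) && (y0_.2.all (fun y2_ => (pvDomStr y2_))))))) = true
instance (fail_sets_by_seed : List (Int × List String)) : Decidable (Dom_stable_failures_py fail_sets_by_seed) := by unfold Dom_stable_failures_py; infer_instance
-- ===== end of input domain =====

-- B drops A's incrementally maintained intersection set and derives the all-seeds-stable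
-- list purely from the occurrence-count dict via count == number of seeds (simpler; same cost).

-- ===== PORT A =====
-- `fail_sets_by_seed.get(sd) or set()`: a missing or falsy (empty) value becomes a fresh empty set
def pyGetOrEmpty (o : Option (List String)) : List String :=
  match o with
  | none => []
  | some v => if v = [] then [] else v

-- `if inter is None: inter = set(s) else: inter = inter.intersection(s)` as one step
def interStep (acc : Option (PySem.Set String)) (s : PySem.Set String) : Option (PySem.Set String) :=
  match acc with
  | none => some (PySem.Set.ofList s)
  | some i => some (PySem.Set.inter i s)

-- `inter = inter or set()`: None or an empty set becomes a fresh empty set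
def pyOrEmptySet (o : Option (PySem.Set String)) : PySem.Set String :=
  match o with
  | none => []
  | some i => if i = [] then [] else i

def stable_failures_py (fail_sets_by_seed : List (Int × List String)) : List (String × List String) :=
  let d : PySem.Dict Int (List String) := PySem.Dict.mk fail_sets_by_seed
  let seeds : List Int := PySem.List.sorted d.keys (fun x => x) false
  if seeds = [] then [("stable_3of3", []), ("fail_2plus", [])] else
  let st := seeds.foldl (fun (st : Option (PySem.Set String) × PySem.Dict String Int) sd =>
      (interStep st.1 (pyGetOrEmpty (d.get? sd)),
       (pyGetOrEmpty (d.get? sd)).foldl (fun c tid => c.modify tid 0 (· + 1)) st.2))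
    (none, PySem.Dict.empty)
  let inter : PySem.Set String := pyOrEmptySet st.1
  let fail_2plus := PySem.List.sorted ((st.2.items.filter (fun p => decide ((2:Int) ≤ p.2))).map (fun p => p.1)) (fun x => x) false
  [("stable_3of3", PySem.List.sorted inter (fun x => x) false), ("fail_2plus", fail_2plus)]

-- ===== PORT B =====
def stable_failures_py_alt (fail_sets_by_seed : List (Int × List String)) : List (String × List String) :=
  let d : PySem.Dict Int (List String) := PySem.Dict.mk fail_sets_by_seed
  let seeds : List Int := PySem.List.sorted d.keys (fun x => x) false
  if seeds = [] then [("stable_3of3", []), ("fail_2plus", [])] else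
  let counts : PySem.Dict String Int :=
    seeds.foldl (fun c sd => (d.getD sd []).foldl (fun c tid => c.modify tid 0 (· + 1)) c) PySem.Dict.empty
  let n : Int := (seeds.length : Int)
  [("stable_3of3", PySem.List.sorted ((counts.items.filter (fun p => decide (p.2 = n))).map (fun p => p.1)) (fun x => x) false),
   ("fail_2plus", PySem.List.sorted ((counts.items.filter (fun p => decide ((2:Int) ≤ p.2))).map (fun p => p.1)) (fun x => x) false)]

-- ===== PRECONDITION & SPEC =====
-- Pre_ is exactly the encoding invariant of the Python argument dict[int, set[str]]:
-- keys of a dict are unique and a set's element list is duplicate-free; it excludes no Python input.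
def Pre_stable_failures_py (fail_sets_by_seed : List (Int × List String)) : Prop :=
  (fail_sets_by_seed.map (fun p => p.1)).Nodup ∧ ∀ p ∈ fail_sets_by_seed, p.2.Nodup
instance (fail_sets_by_seed : List (Int × List String)) : Decidable (Pre_stable_failures_py fail_sets_by_seed) := by unfold Pre_stable_failures_py; infer_instance

def pvWitness_stable_failures_py : (List (Int × List String)) := [(1, ["a"]), (2, ["a", "b"])]

def Spec_stable_failures_py (fail_sets_by_seed : List (Int × List String)) (out : List (String × List String)) : Prop := out = stable_failures_py_alt fail_sets_by_seed
instance (fail_sets_by_seed : List (Int × List String)) (out : List (String × List String)) : Decidable (Spec_stable_failures_py fail_sets_by_seed out) := by unfold Spec_stable_failures_py; infer_instance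

-- ===== CLAIM (what is proved, stated in full; the proofs are below) =====
def Claim_equal_stable_failures_py : Prop := ∀ (fail_sets_by_seed : List (Int × List String)), Dom_stable_failures_py fail_sets_by_seed → Pre_stable_failures_py fail_sets_by_seed → Spec_stable_failures_py fail_sets_by_seed (stable_failures_py fail_sets_by_seed)

-- ===== LEMMAS AND PROOFS =====

theorem pyGetOrEmpty_eq (o : Option (List String)) : pyGetOrEmpty o = o.getD [] := by
  cases o with
  | none => rfl
  | some v =>
    simp only [pyGetOrEmpty, Option.getD_some]
    split <;> simp_all

-- the Option-valued intersection loop, once started, is a plain foldl of Set.inter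
theorem pyOrEmptySet_some (i : PySem.Set String) : pyOrEmptySet (some i) = i := by
  simp only [pyOrEmptySet]
  split <;> simp_all

theorem interfold_some (rest : List (List String)) (i : PySem.Set String) :
    rest.foldl interStep (some i) = some (rest.foldl PySem.Set.inter i) := by
  induction rest generalizing i with
  | nil => rfl
  | cons s rest ih => simp [List.foldl_cons, interStep, ih]

theorem mem_interfold (rest : List (List String)) (i : PySem.Set String) (t : String) :
    t ∈ rest.foldl PySem.Set.inter i ↔ t ∈ i ∧ ∀ s ∈ rest, t ∈ s := by
  induction rest generalizing i with
  | nil => simp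
  | cons s rest ih =>
    simp only [List.foldl_cons, ih, PySem.Set.mem_inter, List.mem_cons]
    constructor
    · rintro ⟨⟨h1, h2⟩, h3⟩
      exact ⟨h1, fun s' hs' => hs'.elim (fun e => e ▸ h2) (h3 s')⟩
    · rintro ⟨h1, h2⟩
      exact ⟨⟨h1, h2 s (Or.inl rfl)⟩, fun s' hs' => h2 s' (Or.inr hs')⟩

theorem nodup_interfold (rest : List (List String)) (i : PySem.Set String) (h : i.Nodup) :
    (rest.foldl PySem.Set.inter i).Nodup := by
  induction rest generalizing i with
  | nil => exact h
  | cons s rest ih => exact ih _ (PySem.Set.nodup_inter _ _ h)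

-- the nested counting loop: each value is the total count over all processed lists
theorem getD_countsfold (ss : List (List String)) (c : PySem.Dict String Int) (t : String) :
    (ss.foldl (fun c s => s.foldl (fun c tid => c.modify tid 0 (· + 1)) c) c).getD t 0
      = c.getD t 0 + ((ss.map (fun s => ((s.count t : Nat) : Int))).sum) := by
  induction ss generalizing c with
  | nil => simp
  | cons s ss ih =>
    simp only [List.foldl_cons, List.map_cons, List.sum_cons, ih,
      PySem.Dict.getD_foldl_modify_add_one]
    ring

theorem nodup_keys_countsfold (ss : List (List String)) (c : PySem.Dict String Int)
    (h : c.keys.Nodup) :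
    ((ss.foldl (fun c s => s.foldl (fun c tid => c.modify tid 0 (· + 1)) c) c).keys).Nodup := by
  induction ss generalizing c with
  | nil => exact h
  | cons s ss ih =>
    exact ih _ (PySem.Dict.nodup_keys_foldl_modify_key s (fun x => x) 0 (fun _ _ => (· + 1)) c h)

theorem mem_keys_countsfold (ss : List (List String)) (c : PySem.Dict String Int) (t : String) :
    t ∈ (ss.foldl (fun c s => s.foldl (fun c tid => c.modify tid 0 (· + 1)) c) c).keys
      ↔ t ∈ c.keys ∨ ∃ s ∈ ss, t ∈ s := by
  induction ss generalizing c with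
  | nil => simp
  | cons s ss ih =>
    simp only [List.foldl_cons, ih, PySem.Dict.keys_foldl_modify, PySem.Set.mem_update,
      List.mem_cons]
    constructor
    · rintro (⟨h | h⟩ | ⟨s', hs', ht⟩)
      · exact Or.inl h
      · exact Or.inr ⟨s, Or.inl rfl, h⟩
      · exact Or.inr ⟨s', Or.inr hs', ht⟩
    · rintro (h | ⟨s', hs' | hs', ht⟩)
      · exact Or.inl (Or.inl h)
      · exact Or.inl (Or.inr (hs' ▸ ht))
      · exact Or.inr ⟨s', hs', ht⟩

-- a 0/1 indicator sum reaches the length exactly when every indicator is 1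
theorem indicator_sum_eq_length (ss : List (List String)) (t : String)
    (hnd : ∀ s ∈ ss, s.Nodup) :
    ((ss.map (fun s => ((s.count t : Nat) : Int))).sum ≤ (ss.length : Int)) ∧
    (((ss.map (fun s => ((s.count t : Nat) : Int))).sum = (ss.length : Int)) ↔ ∀ s ∈ ss, t ∈ s) := by
  induction ss with
  | nil => simp
  | cons s ss ih =>
    obtain ⟨ihle, ihiff⟩ := ih (fun s' hs' => hnd s' (List.mem_cons_of_mem _ hs'))
    have hcount : ((s.count t : Nat) : Int) ≤ 1 ∧ (((s.count t : Nat) : Int) = 1 ↔ t ∈ s) := by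
      have h1 : s.count t ≤ 1 := List.nodup_iff_count_le_one.mp (hnd s List.mem_cons_self) t
      have h2 : s.count t = 1 ↔ t ∈ s := by
        constructor
        · intro h; exact List.count_pos_iff.mp (by omega)
        · intro h
          have hp : 0 < s.count t := List.count_pos_iff.mpr h
          omega
      constructor
      · exact_mod_cast h1
      · rw [show ((1:Int) = ((1:Nat):Int)) from rfl, Int.natCast_inj]; exact h2
    simp only [List.map_cons, List.sum_cons, List.length_cons, List.mem_cons]
    constructor
    · push_cast; omega
    · constructor
      · intro h
        have hs : ((s.count t : Nat) : Int) = 1 := by push_cast at *; omega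
        have hrest : ((ss.map (fun s => ((s.count t : Nat) : Int))).sum = (ss.length : Int)) := by
          push_cast at *; omega
        intro s' hs'
        rcases hs' with e | hs'
        · exact e ▸ hcount.2.mp hs
        · exact ihiff.mp hrest s' hs'
      · intro h
        have h1 : ((s.count t : Nat) : Int) = 1 := hcount.2.mpr (h s (Or.inl rfl))
        have h2 := ihiff.mpr (fun s' hs' => h s' (Or.inr hs'))
        push_cast at *; omega

-- the crux: sorted running-intersection = sorted keys whose count equals the number of lists
theorem stable_main (s0 : List String) (rest : List (List String))
    (hnd : ∀ s ∈ s0 :: rest, s.Nodup) :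
    PySem.List.sorted (rest.foldl PySem.Set.inter (PySem.Set.ofList s0)) (fun x => x) false
      = PySem.List.sorted
          ((((s0 :: rest).foldl (fun c s => s.foldl (fun c tid => c.modify tid 0 (· + 1)) c)
              (PySem.Dict.empty : PySem.Dict String Int)).items.filter
            (fun p => decide (p.2 = ((s0 :: rest).length : Int)))).map (fun p => p.1))
          (fun x => x) false := by
  set counts := (s0 :: rest).foldl (fun c s => s.foldl (fun c tid => c.modify tid 0 (· + 1)) c)
      (PySem.Dict.empty : PySem.Dict String Int) with hcounts
  have hkeysnd : counts.keys.Nodup := nodup_keys_countsfold (s0 :: rest) _ PySem.Dict.nodup_keys_empty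
  -- rewrite B's filtered items as a filter over the (nodup) key list
  have hitems : counts.items = counts.keys.map (fun k => (k, counts.getD k 0)) :=
    PySem.Dict.items_eq_map_keys counts hkeysnd 0
  have hB : ((counts.items.filter (fun p => decide (p.2 = ((s0 :: rest).length : Int)))).map (fun p => p.1))
      = counts.keys.filter (fun k => decide (counts.getD k 0 = ((s0 :: rest).length : Int))) := by
    rw [hitems, List.filter_map, List.map_map]
    simp [Function.comp_def]
  rw [hB]
  apply PySem.List.sorted_eq_sorted_of_perm _ _ _ (fun a b h => h)
  rw [List.perm_ext_iff_of_nodup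
    (nodup_interfold _ _ (PySem.Set.nodup_ofList s0)) (hkeysnd.filter _)]
  intro t
  have hsum := indicator_sum_eq_length (s0 :: rest) t hnd
  have hgetD : counts.getD t 0 = (((s0 :: rest).map (fun s => ((s.count t : Nat) : Int))).sum) := by
    rw [hcounts, getD_countsfold]; simp [PySem.Dict.getD_empty]
  have hmemkeys : t ∈ counts.keys ↔
      t ∈ (PySem.Dict.empty : PySem.Dict String Int).keys ∨ ∃ s ∈ s0 :: rest, t ∈ s := by
    rw [hcounts]; exact mem_keys_countsfold _ _ _
  rw [mem_interfold, List.mem_filter, hmemkeys]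
  simp only [PySem.Dict.keys_empty, List.not_mem_nil, false_or, PySem.Set.mem_ofList,
    decide_eq_true_eq, hgetD]
  constructor
  · rintro ⟨h0, hr⟩
    have hall : ∀ s ∈ s0 :: rest, t ∈ s := by
      intro s hs; rcases List.mem_cons.mp hs with e | hs
      · exact e ▸ h0
      · exact hr s hs
    exact ⟨⟨s0, List.mem_cons_self, h0⟩, hsum.2.mpr hall⟩
  · rintro ⟨_, hc⟩
    have hall := hsum.2.mp hc
    exact ⟨hall s0 List.mem_cons_self, fun s hs => hall s (List.mem_cons_of_mem _ hs)⟩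

-- glue: each per-seed value list found in the dict is one of the input value lists
theorem getD_nodup (l : List (Int × List String)) (hk : (l.map (fun p => p.1)).Nodup)
    (hv : ∀ p ∈ l, p.2.Nodup) (sd : Int) (hsd : sd ∈ (PySem.Dict.mk l).keys) :
    ((PySem.Dict.mk l : PySem.Dict Int (List String)).getD sd []).Nodup := by
  cases h : (PySem.Dict.mk l : PySem.Dict Int (List String)).get? sd with
  | none => exact absurd ((PySem.Dict.get?_eq_none_iff_not_mem_keys _ _).mp h) (by simpa using hsd)
  | some v =>
    have hmem : (sd, v) ∈ (PySem.Dict.mk l : PySem.Dict Int (List String)).items :=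
      PySem.Dict.mem_items_of_get?_eq_some _ h
    have : (PySem.Dict.mk l : PySem.Dict Int (List String)).getD sd [] = v := by
      rw [PySem.Dict.getD_eq_get?_getD, h]; rfl
    rw [this]
    exact hv _ hmem

-- ===== VERDICT (by name: the statement is the Claim_ definition above) =====
theorem stable_failures_py_spec : Claim_equal_stable_failures_py := by
  intro l _ hPre
  obtain ⟨hk, hv⟩ := hPre
  unfold Spec_stable_failures_py
  simp only [stable_failures_py, stable_failures_py_alt]
  set d : PySem.Dict Int (List String) := PySem.Dict.mk l with hd
  set seeds : List Int := PySem.List.sorted d.keys (fun x => x) false with hseeds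
  by_cases hnil : seeds = []
  · rw [if_pos hnil, if_pos hnil]
  · rw [if_neg hnil, if_neg hnil]
    -- split A's pair-state fold into its two independent components
    rw [PySem.List.foldl_prod_mk
      (fun acc sd => interStep acc (pyGetOrEmpty (d.get? sd)))
      (fun (c : PySem.Dict String Int) sd =>
        (pyGetOrEmpty (d.get? sd)).foldl (fun c tid => c.modify tid 0 (· + 1)) c)]
    have hget : ∀ sd, pyGetOrEmpty (d.get? sd) = d.getD sd [] := by
      intro sd; rw [pyGetOrEmpty_eq, PySem.Dict.getD_eq_get?_getD]
    simp only [hget]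
    obtain ⟨sd0, rest, hcons⟩ := List.exists_cons_of_ne_nil hnil
    -- rewrite both folds as folds over the list of per-seed value lists
    rw [show ∀ (acc : Option (PySem.Set String)),
        seeds.foldl (fun acc sd => interStep acc (d.getD sd [])) acc
        = (seeds.map (fun sd => d.getD sd [])).foldl interStep acc
      from fun acc => List.foldl_map.symm]
    rw [show ∀ (c : PySem.Dict String Int),
        seeds.foldl (fun c sd => (d.getD sd []).foldl (fun c tid => c.modify tid 0 (· + 1)) c) c
        = (seeds.map (fun sd => d.getD sd [])).foldl
            (fun c s => s.foldl (fun c tid => c.modify tid 0 (· + 1)) c) c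
      from fun c => List.foldl_map.symm]
    set ss : List (List String) := seeds.map (fun sd => d.getD sd []) with hssdef
    have hssc : ss = (d.getD sd0 []) :: rest.map (fun sd => d.getD sd []) := by
      rw [hssdef, hcons, List.map_cons]
    have hndss : ∀ s ∈ ss, s.Nodup := by
      intro s hs
      rw [hssdef] at hs
      obtain ⟨sd, hsd, rfl⟩ := List.mem_map.mp hs
      have : sd ∈ d.keys := (PySem.List.mem_sorted _ _ _ _).mp (hseeds ▸ hsd)
      exact getD_nodup l hk (fun p hp => hv p hp) sd this
    have hlen : (seeds.length : Int) = (ss.length : Int) := by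
      rw [hssdef, List.length_map]
    rw [hlen, hssc, List.foldl_cons,
      show interStep none (d.getD sd0 []) = some (PySem.Set.ofList (d.getD sd0 [])) from rfl,
      interfold_some]
    -- A's `inter or set()` unwrapping is the identity on the computed intersection
    rw [pyOrEmptySet_some]
    rw [stable_main (d.getD sd0 []) (rest.map (fun sd => d.getD sd [])) (hssc ▸ hndss)]
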